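-- pv_equiv track=rewrite | github.com/Judongsung/algorithm | 백준/Silver/20310. 타노스/타노스.py | half_string
-- ===== SOURCE A (Python) =====
-- ZERO = '0'
--
-- ONE = '1'
--
-- def half_string(s: str) -> str:
--     result = []
--     zero_count = s.count(ZERO)
--     one_count = len(s)-zero_count
--     zero_count //= 2
--     one_count //= 2
--
--     for ch in s:
--         if ch == ZERO and zero_count:
--             result.append(ZERO)
--             zero_count -= 1
--         elif ch == ONE:
--             if one_count:
--                 one_count -= 1
--             else:
--                 result.append(ONE)
--
--     return ''.join(result)
-- ===== SOURCE B (Python) =====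
-- def half_string(s: str) -> str:
--     # Position tables: keep the first half of the zeros and drop the first
--     # half of the ones (the string is a 0/1 string, so #ones = len(s) - #zeros),
--     # then read the kept positions back off in order.
--     zeros = [i for i, ch in enumerate(s) if ch == '0']
--     ones = [i for i, ch in enumerate(s) if ch == '1']
--     keep = zeros[:len(zeros) // 2] + ones[(len(s) - len(zeros)) // 2:]
--     return ''.join(s[i] for i in sorted(keep))
-- ===== Notes on version B (the rewrite author's own statement) =====
-- stated objective: alternative
-- what changed: B builds explicit position tables with enumerate, keeps the first half of the zero positions and drops the first half of the one positions by list slicing, then sorts the kept positions and reads the characters back off, replacing A's single scan with decrementing zero/one counters.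
import Mathlib
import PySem

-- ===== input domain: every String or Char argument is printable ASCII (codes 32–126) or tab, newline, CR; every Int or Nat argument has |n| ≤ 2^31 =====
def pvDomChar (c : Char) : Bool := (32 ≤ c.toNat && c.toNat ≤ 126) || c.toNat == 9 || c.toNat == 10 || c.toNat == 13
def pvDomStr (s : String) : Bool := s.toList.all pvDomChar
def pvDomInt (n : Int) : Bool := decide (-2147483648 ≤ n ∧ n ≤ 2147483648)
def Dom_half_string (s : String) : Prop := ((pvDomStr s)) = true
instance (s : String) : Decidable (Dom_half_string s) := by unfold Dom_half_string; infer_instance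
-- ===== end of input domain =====

-- B selects the kept characters through explicit position tables (enumerate, slicing,
-- sort) instead of A's single decrement-counter scan; objective: alternative decomposition.

-- ===== PORT A =====
-- one loop step of A's 'for ch in s' (state: result, zero_count, one_count)
def stepA (st : List Char × Int × Int) (ch : Char) : List Char × Int × Int :=
  if ch == '0' && st.2.1 != 0 then (st.1 ++ ['0'], st.2.1 - 1, st.2.2)
  else if ch == '1' then
    if st.2.2 != 0 then (st.1, st.2.1, st.2.2 - 1)
    else (st.1 ++ ['1'], st.2.1, st.2.2)
  else st

def half_string (s : String) : String :=
  let zero_count : Int := (PySem.Str.count s "0" : Int)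
  let one_count : Int := PySem.Str.len s - zero_count
  let zc := PySem.Int.floordiv zero_count 2
  let oc := PySem.Int.floordiv one_count 2
  let st := s.toList.foldl stepA ([], zc, oc)
  String.ofList st.1

-- ===== PORT B =====
def half_string_alt (s : String) : String :=
  let cs := s.toList
  let zeros : List Int := ((PySem.List.enumerate cs).filter (fun p => p.2 == '0')).map (·.1)
  let ones : List Int := ((PySem.List.enumerate cs).filter (fun p => p.2 == '1')).map (·.1)
  let keep := PySem.List.slice zeros none (some (PySem.Int.floordiv (zeros.length : Int) 2))
      ++ PySem.List.slice ones (some (PySem.Int.floordiv ((cs.length : Int) - (zeros.length : Int)) 2)) none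
  String.ofList ((PySem.List.sorted keep (fun x => x) false).filterMap
    (fun i => PySem.List.pyGet? cs i))

-- ===== PRECONDITION & SPEC =====
def Spec_half_string (s : String) (out : String) : Prop := out = half_string_alt s
instance (s : String) (out : String) : Decidable (Spec_half_string s out) := by unfold Spec_half_string; infer_instance

-- ===== CLAIM (what is proved, stated in full; the proofs are below) =====
def Claim_equal_half_string : Prop := ∀ (s : String), Dom_half_string s → Spec_half_string s (half_string s)

-- ===== LEMMAS AND PROOFS =====
theorem countGo_singleton (c : Char) : ∀ (fuel : Nat) (cs : List Char) (acc : Nat),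
    cs.length ≤ fuel → PySem.Chars.count.go [c] fuel cs acc = acc + cs.count c := by
  intro fuel
  induction fuel with
  | zero => intro cs acc h
            have : cs = [] := by cases cs <;> simp_all
            subst this; simp [PySem.Chars.count.go]
  | succ n ih =>
      intro cs acc h
      cases cs with
      | nil => simp [PySem.Chars.count.go]
      | cons x t =>
        simp only [PySem.Chars.count.go]
        by_cases hx : c = x
        · subst hx
          have hpre : [c].isPrefixOf (c :: t) = true := by simp [List.isPrefixOf]
          simp only [hpre]
          rw [show List.drop ([c]).length (c :: t) = t by simp]
          rw [ih t (acc+1) (by simpa using Nat.le_of_succ_le_succ (by simpa using h))]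
          simp
          omega
        · have hpre : [c].isPrefixOf (x :: t) = false := by
            simp [List.isPrefixOf]
            exact fun h' => absurd h' hx
          simp only [hpre]
          rw [ih t acc (by simpa using h)]
          simp [List.count_cons]
          intro hxc; exact absurd hxc.symm hx

theorem str_count_zero (s : String) : PySem.Str.count s "0" = s.toList.count '0' := by
  rw [PySem.Str.count_eq]
  show PySem.Chars.count s.toList ['0'] = _
  unfold PySem.Chars.count
  rw [if_neg (by simp)]
  rw [countGo_singleton '0' s.toList.length s.toList 0 le_rfl]
  omega

def posOf (p : Char → Bool) : List Char → Int → List Int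
  | [], _ => []
  | c :: t, i => if p c then i :: posOf p t (i + 1) else posOf p t (i + 1)

theorem enum_filter_map (p : Char → Bool) : ∀ (cs : List Char) (i : Int),
    ((PySem.List.enumerate cs i).filter (fun q => p q.2)).map (·.1) = posOf p cs i := by
  intro cs
  induction cs with
  | nil => intro i; simp [PySem.List.enumerate, posOf]
  | cons c t ih =>
      intro i
      rw [PySem.List.enumerate_cons]
      by_cases hc : p c <;> simp [hc, posOf, ih]

theorem posOf_length (p : Char → Bool) : ∀ (cs : List Char) (i : Int),
    (posOf p cs i).length = cs.countP p := by
  intro cs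
  induction cs with
  | nil => intro i; simp [posOf]
  | cons c t ih =>
      intro i
      by_cases hc : p c <;> simp [posOf, hc, ih]


def keepList : List Char → Nat → Nat → List Char
  | [], _, _ => []
  | c :: t, zc, oc =>
    if c == '0' then
      match zc with
      | 0 => keepList t 0 oc
      | z + 1 => '0' :: keepList t z oc
    else if c == '1' then
      match oc with
      | 0 => '1' :: keepList t zc 0
      | o + 1 => keepList t zc o
    else keepList t zc oc

theorem foldA (cs : List Char) : ∀ (acc : List Char) (zc oc : Int), 0 ≤ zc → 0 ≤ oc →
    (cs.foldl stepA (acc, zc, oc)).1 = acc ++ keepList cs zc.toNat oc.toNat := by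
  induction cs with
  | nil => intro acc zc oc _ _; simp [keepList]
  | cons c t ih =>
      intro acc zc oc hz ho
      rw [List.foldl_cons]
      by_cases hc0 : c = '0'
      · subst hc0
        by_cases hzz : zc = 0
        · subst hzz
          have hs : stepA (acc, 0, oc) '0' = (acc, 0, oc) := by simp [stepA]
          rw [hs, ih acc 0 oc le_rfl ho]
          simp [keepList]
        · have hs : stepA (acc, zc, oc) '0' = (acc ++ ['0'], zc - 1, oc) := by
            simp [stepA, hzz]
          rw [hs, ih _ _ _ (by omega) ho]
          have hzt : zc.toNat = (zc - 1).toNat + 1 := by omega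
          rw [hzt]
          simp [keepList]
      · by_cases hc1 : c = '1'
        · subst hc1
          by_cases hoz : oc = 0
          · subst hoz
            have hs : stepA (acc, zc, 0) '1' = (acc ++ ['1'], zc, 0) := by
              simp [stepA]
            rw [hs, ih _ _ _ hz le_rfl]
            simp [keepList]
          · have hs : stepA (acc, zc, oc) '1' = (acc, zc, oc - 1) := by
              simp [stepA, hoz]
            rw [hs, ih _ _ _ hz (by omega)]
            have hot : oc.toNat = (oc - 1).toNat + 1 := by omega
            rw [hot]
            simp [keepList]
        · have hs : stepA (acc, zc, oc) c = (acc, zc, oc) := by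
            simp [stepA, hc0, hc1]
          rw [hs, ih _ _ _ hz ho]
          simp [keepList, hc0, hc1]

def keptIdx : List Char → Nat → Nat → Int → List Int
  | [], _, _, _ => []
  | c :: t, zc, oc, i =>
    if c == '0' then
      match zc with
      | 0 => keptIdx t 0 oc (i + 1)
      | z + 1 => i :: keptIdx t z oc (i + 1)
    else if c == '1' then
      match oc with
      | 0 => i :: keptIdx t zc 0 (i + 1)
      | o + 1 => keptIdx t zc o (i + 1)
    else keptIdx t zc oc (i + 1)

theorem keptIdx_ge : ∀ (cs : List Char) (zc oc : Nat) (i : Int),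
    ∀ x ∈ keptIdx cs zc oc i, i ≤ x := by
  intro cs
  induction cs with
  | nil => intro zc oc i x hx; simp [keptIdx] at hx
  | cons c t ih =>
      intro zc oc i x hx
      by_cases hc0 : c = '0'
      · subst hc0
        cases zc with
        | zero =>
            simp only [keptIdx] at hx
            rw [if_pos (by decide)] at hx
            have := ih 0 oc (i+1) x hx; omega
        | succ z =>
            simp only [keptIdx] at hx
            rw [if_pos (by decide)] at hx
            rcases List.mem_cons.mp hx with h | h
            · omega
            · have := ih z oc (i+1) x h; omega
      · have hb0 : ¬ ((c == '0') = true) := by simpa using hc0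
        by_cases hc1 : c = '1'
        · subst hc1
          cases oc with
          | zero =>
              simp only [keptIdx] at hx
              rw [if_neg hb0, if_pos (by decide)] at hx
              rcases List.mem_cons.mp hx with h | h
              · omega
              · have := ih zc 0 (i+1) x h; omega
          | succ o =>
              simp only [keptIdx] at hx
              rw [if_neg hb0, if_pos (by decide)] at hx
              have := ih zc o (i+1) x hx; omega
        · have hb1 : ¬ ((c == '1') = true) := by simpa using hc1
          simp only [keptIdx] at hx
          rw [if_neg hb0, if_neg hb1] at hx
          have := ih zc oc (i+1) x hx; omega

theorem keptIdx_pairwise : ∀ (cs : List Char) (zc oc : Nat) (i : Int),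
    (keptIdx cs zc oc i).Pairwise (· < ·) := by
  intro cs
  induction cs with
  | nil => intro zc oc i; simp [keptIdx]
  | cons c t ih =>
      intro zc oc i
      have hd : ∀ zc' oc', (i :: keptIdx t zc' oc' (i+1)).Pairwise (· < ·) := by
        intro zc' oc'
        refine List.pairwise_cons.mpr ⟨?_, ih zc' oc' (i+1)⟩
        intro x hx
        have := keptIdx_ge t zc' oc' (i+1) x hx
        omega
      by_cases hc0 : c = '0'
      · subst hc0
        cases zc with
        | zero => simp only [keptIdx]; rw [if_pos (by decide)]; exact ih 0 oc (i+1)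
        | succ z => simp only [keptIdx]; rw [if_pos (by decide)]; exact hd z oc
      · have hb0 : ¬ ((c == '0') = true) := by simpa using hc0
        by_cases hc1 : c = '1'
        · subst hc1
          cases oc with
          | zero => simp only [keptIdx]; rw [if_neg hb0, if_pos (by decide)]; exact hd zc 0
          | succ o => simp only [keptIdx]; rw [if_neg hb0, if_pos (by decide)]; exact ih zc o (i+1)
        · have hb1 : ¬ ((c == '1') = true) := by simpa using hc1
          simp only [keptIdx]; rw [if_neg hb0, if_neg hb1]; exact ih zc oc (i+1)

theorem keptIdx_perm : ∀ (cs : List Char) (zc oc : Nat) (i : Int),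
    (keptIdx cs zc oc i).Perm
      ((posOf (· == '0') cs i).take zc ++ (posOf (· == '1') cs i).drop oc) := by
  intro cs
  induction cs with
  | nil => intro zc oc i; simp [keptIdx, posOf]
  | cons c t ih =>
      intro zc oc i
      by_cases hc0 : c = '0'
      · subst hc0
        simp only [posOf]
        rw [if_pos (by decide), if_neg (by decide)]
        cases zc with
        | zero =>
            simp only [List.take_zero, List.nil_append, keptIdx]
            rw [if_pos (by decide)]
            simpa using ih 0 oc (i+1)
        | succ z =>
            simp only [keptIdx, List.take_succ_cons]
            rw [if_pos (by decide)]
            exact List.Perm.cons i (ih z oc (i+1))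
      · have hb0 : ¬ ((c == '0') = true) := by simpa using hc0
        by_cases hc1 : c = '1'
        · subst hc1
          simp only [posOf]
          rw [if_neg (by decide), if_pos (by decide)]
          cases oc with
          | zero =>
              simp only [keptIdx, List.drop_zero]
              rw [if_neg hb0, if_pos (by decide)]
              refine (List.Perm.cons i ?_).trans List.perm_middle.symm
              simpa using ih zc 0 (i+1)
          | succ o =>
              simp only [keptIdx, List.drop_succ_cons]
              rw [if_neg hb0, if_pos (by decide)]
              exact ih zc o (i+1)
        · have hb1 : ¬ ((c == '1') = true) := by simpa using hc1
          simp only [posOf, keptIdx]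
          rw [if_neg hb0, if_neg hb1, if_neg hb0, if_neg hb1]
          exact ih zc oc (i+1)

theorem keptIdx_filterMap : ∀ (cs pre : List Char) (zc oc : Nat),
    (keptIdx cs zc oc (pre.length : Int)).filterMap
        (fun i => PySem.List.pyGet? (pre ++ cs) i) = keepList cs zc oc := by
  intro cs
  induction cs with
  | nil => intro pre zc oc; simp [keptIdx, keepList]
  | cons c t ih =>
      intro pre zc oc
      have hstep : ((pre.length : Int) + 1) = (((pre ++ [c]).length : Nat) : Int) := by
        simp
      have happ : pre ++ c :: t = (pre ++ [c]) ++ t := by simp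
      have hget : PySem.List.pyGet? (pre ++ c :: t) (pre.length : Int) = some c :=
        PySem.List.pyGet?_append_length pre t c
      have htail : ∀ zc' oc',
          (keptIdx t zc' oc' ((pre.length : Int) + 1)).filterMap
            (fun i => PySem.List.pyGet? (pre ++ c :: t) i) = keepList t zc' oc' := by
        intro zc' oc'
        rw [hstep, happ]
        exact ih (pre ++ [c]) zc' oc'
      by_cases hc0 : c = '0'
      · subst hc0
        cases zc with
        | zero =>
            simp only [keptIdx, keepList]
            rw [if_pos (by decide), if_pos (by decide)]
            exact htail 0 oc
        | succ z =>
            simp only [keptIdx, keepList]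
            rw [if_pos (by decide), if_pos (by decide)]
            rw [List.filterMap_cons]
            rw [hget]
            rw [htail z oc]
      · have hb0 : ¬ ((c == '0') = true) := by simpa using hc0
        by_cases hc1 : c = '1'
        · subst hc1
          cases oc with
          | zero =>
              simp only [keptIdx, keepList]
              rw [if_neg hb0, if_pos (by decide), if_neg hb0, if_pos (by decide)]
              rw [List.filterMap_cons, hget, htail zc 0]
          | succ o =>
              simp only [keptIdx, keepList]
              rw [if_neg hb0, if_pos (by decide), if_neg hb0, if_pos (by decide)]
              exact htail zc o
        · have hb1 : ¬ ((c == '1') = true) := by simpa using hc1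
          simp only [keptIdx, keepList]
          rw [if_neg hb0, if_neg hb1, if_neg hb0, if_neg hb1]
          exact htail zc oc



theorem half_string_eq (s : String) : half_string s = half_string_alt s := by
  have hz_le : s.toList.count '0' ≤ s.toList.length := List.count_le_length
  set cs := s.toList with hcs
  set z := cs.count '0' with hzdef
  set n := cs.length with hndef
  have hfd1 : PySem.Int.floordiv (z : Int) 2 = ((z / 2 : Nat) : Int) := by
    exact_mod_cast PySem.Int.floordiv_natCast z 2
  have hsub : ((n : Int) - (z : Int)) = (((n - z : Nat)) : Int) := by omega
  have hfd2 : PySem.Int.floordiv ((n : Int) - (z : Int)) 2 = (((n - z) / 2 : Nat) : Int) := by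
    rw [hsub]; exact_mod_cast PySem.Int.floordiv_natCast (n - z) 2
  have hA : half_string s = String.ofList (keepList cs (z / 2) ((n - z) / 2)) := by
    unfold half_string
    rw [str_count_zero s, PySem.Str.len_eq]
    simp only [← hcs, ← hzdef, ← hndef, hfd1, hfd2]
    rw [foldA cs [] _ _ (by positivity) (by positivity)]
    simp only [Int.toNat_natCast, List.nil_append]
  have hpos0 : ((PySem.List.enumerate cs).filter (fun p => p.2 == '0')).map (·.1)
      = posOf (· == '0') cs 0 := enum_filter_map (· == '0') cs 0
  have hpos1 : ((PySem.List.enumerate cs).filter (fun p => p.2 == '1')).map (·.1)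
      = posOf (· == '1') cs 0 := enum_filter_map (· == '1') cs 0
  have hlz : (posOf (· == '0') cs 0).length = z := by
    rw [posOf_length]; rfl
  have hB : half_string_alt s = String.ofList (keepList cs (z / 2) ((n - z) / 2)) := by
    unfold half_string_alt
    simp only [← hcs, hpos0, hpos1, hlz, ← hndef, hfd1, hfd2]
    rw [PySem.List.slice_to_natCast, PySem.List.slice_from_natCast]
    rw [PySem.List.sorted_eq_of_perm_of_pairwise_lt _ _ _
      (keptIdx_perm cs (z / 2) ((n - z) / 2) 0) (keptIdx_pairwise cs (z / 2) ((n - z) / 2) 0)]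
    have h2 : (keptIdx cs (z / 2) ((n - z) / 2) 0).filterMap
        (fun i => PySem.List.pyGet? cs i) = keepList cs (z / 2) ((n - z) / 2) := by
      simpa using keptIdx_filterMap cs [] (z / 2) ((n - z) / 2)
    rw [h2]
  rw [hA, hB]

-- ===== VERDICT (by name: the statement is the Claim_ definition above) =====
theorem half_string_spec : Claim_equal_half_string := by
  intro s _
  unfold Spec_half_string
  exact half_string_eq s
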